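-- pv_equiv track=rewrite | github.com/Yuu6798/ugh-quantamental | src/ugh_quantamental/fx_protocol/monthly_governance.py | classify_judgment
-- ===== SOURCE A (Python) =====
-- from typing import Any
--
-- JUDGMENT_KEEP = "keep"
--
-- JUDGMENT_LOGIC_AUDIT = "logic_audit"
--
-- JUDGMENT_DATA_PROVIDER_REMEDIATION = "data_provider_remediation"
--
-- def classify_judgment(
--     review_flags: list[dict[str, str]],
--     baseline_comparisons: list[dict[str, Any]],
--     provider_health_summary: dict[str, Any],
--     annotation_coverage_summary: dict[str, Any],
-- ) -> str:
--     """Classify the monthly review into one of the four governance categories.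
--
--     Priority order (highest first):
--     1. Provider / missing window issues → data_provider_remediation
--     2. Annotation coverage issues → data_provider_remediation
--     3. Clear inferiority to baselines → logic_audit
--     4. State / disconfirmer bias → logic_audit
--     5. No issues → keep
--
--     This function does NOT produce ``version_promotion_candidate``.
--     That category requires prior logic audit investigation and explicit
--     human decision — it cannot be auto-classified from a single month's data.
--
--     Returns one of: keep, logic_audit, data_provider_remediation.
--     """
--     flag_ids = {f["flag"] for f in review_flags}
--
--     # Priority 1 & 2: data / provider / annotation issues
--     data_flags = {"provider_quality_issue", "missing_windows", "low_annotation_coverage"}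
--     if flag_ids & data_flags:
--         return JUDGMENT_DATA_PROVIDER_REMEDIATION
--
--     # Priority 3 & 4: logic-related flags
--     logic_flags = {"inspect_magnitude_mapping", "inspect_direction_logic", "inspect_state_mapping"}
--     if flag_ids & logic_flags:
--         return JUDGMENT_LOGIC_AUDIT
--
--     # Priority 5: insufficient data is treated as keep (no action possible)
--     if flag_ids == {"insufficient_data"}:
--         return JUDGMENT_KEEP
--
--     return JUDGMENT_KEEP
-- ===== SOURCE B (Python) =====
-- _RANK = {
--     "provider_quality_issue": 0,
--     "missing_windows": 0,
--     "low_annotation_coverage": 0,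
--     "inspect_magnitude_mapping": 1,
--     "inspect_direction_logic": 1,
--     "inspect_state_mapping": 1,
-- }
--
-- _CATEGORY = ("data_provider_remediation", "logic_audit", "keep")
--
--
-- def classify_judgment(review_flags, baseline_comparisons, provider_health_summary, annotation_coverage_summary):
--     """Single aggregating pass: track the best (lowest) priority rank seen."""
--     best = 2
--     for f in review_flags:
--         best = min(best, _RANK.get(f["flag"], 2))
--     return _CATEGORY[best]
-- ===== Notes on version B (the rewrite author's own statement) =====
-- stated objective: alternative
-- what changed: Replaces A's set construction plus two set-intersection membership tests by a single table-driven pass over review_flags that aggregates the minimum priority rank and indexes the category tuple with it.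
import Mathlib
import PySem

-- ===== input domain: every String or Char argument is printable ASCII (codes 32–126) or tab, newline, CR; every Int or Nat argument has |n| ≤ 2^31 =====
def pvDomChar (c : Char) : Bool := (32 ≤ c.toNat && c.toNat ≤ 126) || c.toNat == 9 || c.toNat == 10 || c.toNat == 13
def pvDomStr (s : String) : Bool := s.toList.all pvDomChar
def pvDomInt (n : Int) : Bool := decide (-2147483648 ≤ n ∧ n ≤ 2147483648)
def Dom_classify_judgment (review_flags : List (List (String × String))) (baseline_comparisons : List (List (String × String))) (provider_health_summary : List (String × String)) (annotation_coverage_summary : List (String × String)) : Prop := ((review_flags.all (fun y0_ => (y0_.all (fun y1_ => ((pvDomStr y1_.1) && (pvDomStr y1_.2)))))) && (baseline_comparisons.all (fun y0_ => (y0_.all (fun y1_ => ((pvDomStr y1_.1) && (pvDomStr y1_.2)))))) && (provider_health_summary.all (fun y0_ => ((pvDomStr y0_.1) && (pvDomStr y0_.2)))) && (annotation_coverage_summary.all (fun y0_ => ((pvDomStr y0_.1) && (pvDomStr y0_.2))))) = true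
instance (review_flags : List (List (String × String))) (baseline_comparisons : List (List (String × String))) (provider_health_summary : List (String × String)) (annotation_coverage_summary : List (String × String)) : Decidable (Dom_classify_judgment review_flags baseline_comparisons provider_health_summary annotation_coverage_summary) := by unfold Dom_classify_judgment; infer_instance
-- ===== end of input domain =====

-- B replaces A's two set-intersection membership tests by a single table-driven
-- aggregating pass that tracks the minimum priority rank over all flags (objective: alternative).


-- ===== PORT A =====
-- f["flag"]: first-match lookup; total stand-in (getD "") — KeyError inputs are excluded by Pre_.
def pvFlagOf (f : List (String × String)) : String :=
  ((PySem.Dict.mk f).get? "flag").getD ""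

def pvDataFlags : PySem.Set String :=
  PySem.Set.ofList ["provider_quality_issue", "missing_windows", "low_annotation_coverage"]

def pvLogicFlags : PySem.Set String :=
  PySem.Set.ofList ["inspect_magnitude_mapping", "inspect_direction_logic", "inspect_state_mapping"]

def classify_judgment (review_flags : List (List (String × String))) (baseline_comparisons : List (List (String × String))) (provider_health_summary : List (String × String)) (annotation_coverage_summary : List (String × String)) : String :=
  let flag_ids : PySem.Set String := PySem.Set.ofList (review_flags.map pvFlagOf)
  if PySem.Set.inter flag_ids pvDataFlags ≠ [] then "data_provider_remediation"
  else if PySem.Set.inter flag_ids pvLogicFlags ≠ [] then "logic_audit"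
  else if PySem.Set.equal flag_ids (PySem.Set.ofList ["insufficient_data"]) then "keep"
  else "keep"

-- ===== PORT B =====
def pvRankDict : PySem.Dict String Int := PySem.Dict.mk
  [("provider_quality_issue", 0), ("missing_windows", 0), ("low_annotation_coverage", 0),
   ("inspect_magnitude_mapping", 1), ("inspect_direction_logic", 1), ("inspect_state_mapping", 1)]

def pvCategories : List String := ["data_provider_remediation", "logic_audit", "keep"]

def classify_judgment_alt (review_flags : List (List (String × String))) (baseline_comparisons : List (List (String × String))) (provider_health_summary : List (String × String)) (annotation_coverage_summary : List (String × String)) : String :=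
  let best : Int := review_flags.foldl (fun b f => min b (pvRankDict.getD (pvFlagOf f) 2)) 2
  PySem.List.pyGetD pvCategories best ""

-- ===== PRECONDITION & SPEC =====
-- Pre_ excludes exactly the inputs where some review flag dict lacks the "flag" key: there the Python A raises KeyError.
def Pre_classify_judgment (review_flags : List (List (String × String))) (baseline_comparisons : List (List (String × String))) (provider_health_summary : List (String × String)) (annotation_coverage_summary : List (String × String)) : Prop :=
  ∀ f ∈ review_flags, "flag" ∈ f.map (·.1)
instance (review_flags : List (List (String × String))) (baseline_comparisons : List (List (String × String))) (provider_health_summary : List (String × String)) (annotation_coverage_summary : List (String × String)) : Decidable (Pre_classify_judgment review_flags baseline_comparisons provider_health_summary annotation_coverage_summary) := by unfold Pre_classify_judgment; infer_instance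

def pvWitness_classify_judgment : (List (List (String × String))) × (List (List (String × String))) × (List (String × String)) × (List (String × String)) :=
  ([[("flag", "missing_windows")], [("flag", "insufficient_data")]], [], [], [])

def Spec_classify_judgment (review_flags : List (List (String × String))) (baseline_comparisons : List (List (String × String))) (provider_health_summary : List (String × String)) (annotation_coverage_summary : List (String × String)) (out : String) : Prop := out = classify_judgment_alt review_flags baseline_comparisons provider_health_summary annotation_coverage_summary
instance (review_flags : List (List (String × String))) (baseline_comparisons : List (List (String × String))) (provider_health_summary : List (String × String)) (annotation_coverage_summary : List (String × String)) (out : String) : Decidable (Spec_classify_judgment review_flags baseline_comparisons provider_health_summary annotation_coverage_summary out) := by unfold Spec_classify_judgment; infer_instance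

-- ===== CLAIM (what is proved, stated in full; the proofs are below) =====
def Claim_equal_classify_judgment : Prop := ∀ (review_flags : List (List (String × String))) (baseline_comparisons : List (List (String × String))) (provider_health_summary : List (String × String)) (annotation_coverage_summary : List (String × String)), Dom_classify_judgment review_flags baseline_comparisons provider_health_summary annotation_coverage_summary → Pre_classify_judgment review_flags baseline_comparisons provider_health_summary annotation_coverage_summary → Spec_classify_judgment review_flags baseline_comparisons provider_health_summary annotation_coverage_summary (classify_judgment review_flags baseline_comparisons provider_health_summary annotation_coverage_summary)

-- ===== LEMMAS AND PROOFS =====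

def pvRankOf (f : List (String × String)) : Int := pvRankDict.getD (pvFlagOf f) 2

lemma pvRank_cases (s : String) :
    pvRankDict.getD s 2 = 0 ∨ pvRankDict.getD s 2 = 1 ∨ pvRankDict.getD s 2 = 2 := by
  simp [pvRankDict, PySem.Dict.getD, PySem.Dict.get?_mk_cons]
  split_ifs <;> simp [PySem.Dict.get?]

lemma pvRank0_iff (s : String) : pvRankDict.getD s 2 = 0 ↔ s ∈ pvDataFlags := by
  simp [pvRankDict, pvDataFlags, PySem.Dict.getD, PySem.Dict.get?_mk_cons, PySem.Set.mem_ofList]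
  split_ifs <;> (constructor <;> intro h <;> subst_vars <;> simp_all [PySem.Dict.get?]) <;>
    (rcases h with h | h | h <;> simp_all)

lemma pvRank1_iff (s : String) : pvRankDict.getD s 2 = 1 ↔ s ∈ pvLogicFlags := by
  simp [pvRankDict, pvLogicFlags, PySem.Dict.getD, PySem.Dict.get?_mk_cons, PySem.Set.mem_ofList]
  split_ifs <;> (constructor <;> intro h <;> subst_vars <;> simp_all [PySem.Dict.get?]) <;>
    (rcases h with h | h | h <;> simp_all)

def pvBest (l : List (List (String × String))) : Int :=
  if l.any (fun f => pvRankOf f = 0) then 0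
  else if l.any (fun f => pvRankOf f = 1) then 1 else 2

lemma pvBest_le (l : List (List (String × String))) : pvBest l ≤ 2 := by
  unfold pvBest; split_ifs <;> omega

lemma pvBest_cons (x : List (String × String)) (l : List (List (String × String))) :
    pvBest (x :: l) = min (pvRankOf x) (pvBest l) := by
  unfold pvBest
  rcases pvRank_cases (pvFlagOf x) with h | h | h <;>
    simp [List.any_cons, pvRankOf, h] <;> (split_ifs <;> omega)

lemma pvFoldB (l : List (List (String × String))) (b : Int) (hb : b ≤ 2) :
    l.foldl (fun b f => min b (pvRankDict.getD (pvFlagOf f) 2)) b = min b (pvBest l) := by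
  induction l generalizing b with
  | nil => simp [pvBest]; omega
  | cons x l ih =>
    rw [List.foldl_cons, ih (min b (pvRankDict.getD (pvFlagOf x) 2)) (by
      rcases pvRank_cases (pvFlagOf x) with h | h | h <;> omega), pvBest_cons]
    have := pvBest_le l
    rcases pvRank_cases (pvFlagOf x) with h | h | h <;> simp [pvRankOf, h]

lemma pvInter_ne_nil (rf : List (List (String × String))) (t : PySem.Set String) :
    PySem.Set.inter (PySem.Set.ofList (rf.map pvFlagOf)) t ≠ [] ↔
      ∃ f ∈ rf, pvFlagOf f ∈ t := by
  rw [← List.isEmpty_eq_false_iff, List.isEmpty_eq_false_iff_exists_mem]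
  constructor
  · rintro ⟨x, hx⟩
    rw [PySem.Set.mem_inter] at hx
    obtain ⟨h1, h2⟩ := hx
    rw [PySem.Set.mem_ofList, List.mem_map] at h1
    obtain ⟨f, hf, rfl⟩ := h1
    exact ⟨f, hf, h2⟩
  · rintro ⟨f, hf, ht⟩
    exact ⟨pvFlagOf f, by
      rw [PySem.Set.mem_inter, PySem.Set.mem_ofList]
      exact ⟨List.mem_map.mpr ⟨f, hf, rfl⟩, ht⟩⟩

-- ===== VERDICT (by name: the statement is the Claim_ definition above) =====
theorem classify_judgment_spec : Claim_equal_classify_judgment := by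
  intro rf bc ph ac _ _
  unfold Spec_classify_judgment classify_judgment classify_judgment_alt
  rw [pvFoldB rf 2 (by norm_num)]
  by_cases h0 : ∃ f ∈ rf, pvRankOf f = 0
  · have hA : PySem.Set.inter (PySem.Set.ofList (rf.map pvFlagOf)) pvDataFlags ≠ [] := by
      obtain ⟨f, hf, h⟩ := h0
      exact (pvInter_ne_nil rf pvDataFlags).mpr ⟨f, hf, (pvRank0_iff _).mp h⟩
    have hB : pvBest rf = 0 := by
      unfold pvBest
      rw [if_pos]
      simpa [List.any_eq_true] using h0
    rw [if_pos hA, hB]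
    rfl
  · by_cases h1 : ∃ f ∈ rf, pvRankOf f = 1
    · have hAd : ¬ PySem.Set.inter (PySem.Set.ofList (rf.map pvFlagOf)) pvDataFlags ≠ [] := by
        intro hc
        obtain ⟨f, hf, h⟩ := (pvInter_ne_nil rf pvDataFlags).mp hc
        exact h0 ⟨f, hf, (pvRank0_iff _).mpr h⟩
      have hAl : PySem.Set.inter (PySem.Set.ofList (rf.map pvFlagOf)) pvLogicFlags ≠ [] := by
        obtain ⟨f, hf, h⟩ := h1
        exact (pvInter_ne_nil rf pvLogicFlags).mpr ⟨f, hf, (pvRank1_iff _).mp h⟩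
      have hB : pvBest rf = 1 := by
        unfold pvBest
        rw [if_neg, if_pos]
        · simpa [List.any_eq_true] using h1
        · simpa [List.any_eq_true] using h0
      rw [if_neg hAd, if_pos hAl, hB]
      rfl
    · have hAd : ¬ PySem.Set.inter (PySem.Set.ofList (rf.map pvFlagOf)) pvDataFlags ≠ [] := by
        intro hc
        obtain ⟨f, hf, h⟩ := (pvInter_ne_nil rf pvDataFlags).mp hc
        exact h0 ⟨f, hf, (pvRank0_iff _).mpr h⟩
      have hAl : ¬ PySem.Set.inter (PySem.Set.ofList (rf.map pvFlagOf)) pvLogicFlags ≠ [] := by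
        intro hc
        obtain ⟨f, hf, h⟩ := (pvInter_ne_nil rf pvLogicFlags).mp hc
        exact h1 ⟨f, hf, (pvRank1_iff _).mpr h⟩
      have hB : pvBest rf = 2 := by
        unfold pvBest
        rw [if_neg, if_neg]
        · simpa [List.any_eq_true] using h1
        · simpa [List.any_eq_true] using h0
      rw [if_neg hAd, if_neg hAl, ite_self, hB]
      rfl
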